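-- pv_equiv track=rewrite | github.com/MarwahAlaofi/acm-proceedings | lib/easychair_exporters.py | clean_affiliation_string
-- ===== SOURCE A (Python) =====
-- from typing import Optional, Literal
--
-- def clean_affiliation_string(affiliation_str: Optional[str]) -> str:
--     """
--     Clean affiliation string by stripping whitespace and leading/trailing punctuation.
--
--     Handles common data quality issues like:
--     - ", Tsinghua University" → "Tsinghua University"
--     - "MIT, " → "MIT"
--     - " , Stanford University" → "Stanford University"
--
--     Args:
--         affiliation_str: Raw affiliation string
--
--     Returns:
--         str: Cleaned affiliation string
--     """
--     if not affiliation_str: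
--         return ""
--
--     # Strip whitespace
--     cleaned = affiliation_str.strip()
--
--     # Strip leading/trailing punctuation (commas, semicolons, periods, etc.)
--     # Keep stripping until no more leading/trailing punctuation+whitespace
--     while cleaned and cleaned[0] in '.,;:-_':
--         cleaned = cleaned[1:].strip()
--     while cleaned and cleaned[-1] in '.,;:-_':
--         cleaned = cleaned[:-1].strip()
--
--     return cleaned
-- ===== SOURCE B (Python) =====
-- def clean_affiliation_string(affiliation_str):
--     """Two-pointer scan: one combined bad-character predicate, one final slice."""
--     if not affiliation_str:
--         return ""
--     s = affiliation_str
--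
--     def bad(ch):
--         return ch.isspace() or ch in '.,;:-_'
--
--     start, end = 0, len(s)
--     while start < end and bad(s[start]):
--         start += 1
--     while start < end and bad(s[end - 1]):
--         end -= 1
--     return s[start:end]
-- ===== Notes on version B (the rewrite author's own statement) =====
-- stated objective: simpler
-- what changed: Replaced A's repeated strip()-and-slice while-loops (which rebuild the string each iteration) by a single two-pointer index scan with one combined bad-character predicate and a single final slice.
import Mathlib
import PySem

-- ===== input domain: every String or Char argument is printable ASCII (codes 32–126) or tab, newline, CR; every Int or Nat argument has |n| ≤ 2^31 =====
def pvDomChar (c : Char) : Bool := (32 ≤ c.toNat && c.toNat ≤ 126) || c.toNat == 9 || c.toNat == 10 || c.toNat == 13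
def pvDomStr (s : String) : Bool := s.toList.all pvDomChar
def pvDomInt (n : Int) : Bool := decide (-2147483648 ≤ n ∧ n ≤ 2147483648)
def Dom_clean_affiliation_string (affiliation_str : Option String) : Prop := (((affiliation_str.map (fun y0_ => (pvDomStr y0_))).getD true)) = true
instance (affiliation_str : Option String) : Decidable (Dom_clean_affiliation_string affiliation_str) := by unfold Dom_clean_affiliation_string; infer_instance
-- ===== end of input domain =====

-- B replaces A's alternating strip-and-slice while-loops by a single two-pointer index
-- scan with one combined bad-character predicate and one final slice (objective: simpler).

-- ===== PORT A =====
def pvPunct : List Char := ['.', ',', ';', ':', '-', '_']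
theorem pv_strip_len_le (l : List Char) : (PySem.Chars.strip l).length ≤ l.length := by
  simp only [PySem.Chars.strip, PySem.Chars.rstrip, PySem.Chars.lstrip, List.length_reverse]
  calc (List.dropWhile PySem.Chars.isspace (List.dropWhile PySem.Chars.isspace l).reverse).length
      ≤ (List.dropWhile PySem.Chars.isspace l).reverse.length := List.length_dropWhile_le _ _
    _ ≤ l.length := by simpa using List.length_dropWhile_le PySem.Chars.isspace l
def pvALead (l : List Char) : List Char :=
  match l with
  | [] => []
  | c :: rest =>
    if pvPunct.contains c then pvALead (PySem.Chars.strip rest) else c :: rest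
termination_by l.length
decreasing_by simpa using Nat.lt_succ_of_le (pv_strip_len_le rest)
def pvATrail (l : List Char) : List Char :=
  match h : l.getLast? with
  | none => []
  | some c =>
    if pvPunct.contains c then pvATrail (PySem.Chars.strip l.dropLast) else l
termination_by l.length
decreasing_by
  have hne : l ≠ [] := by intro he; subst he; simp at h
  have h1 : (PySem.Chars.strip l.dropLast).length ≤ l.dropLast.length := pv_strip_len_le _
  have h2 : l.dropLast.length < l.length := by
    cases l with
    | nil => exact absurd rfl hne
    | cons a t => simp [Nat.lt_succ_of_le]
  omega


def clean_affiliation_string (affiliation_str : Option String) : String :=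
  match affiliation_str with
  | none => ""
  | some s =>
    if s.toList = [] then ""
    else String.ofList (pvATrail (pvALead (PySem.Chars.strip s.toList)))

-- ===== PORT B =====
-- bad(ch) = ch.isspace() or ch in '.,;:-_'
def pvBad (c : Char) : Bool := PySem.Chars.isspace c || pvPunct.contains c

def pvBAdv (l : List Char) (s e : Nat) : Nat :=
  if _h : s < e ∧ pvBad (l.getD s ' ') then pvBAdv l (s + 1) e else s
termination_by e - s
decreasing_by omega
def pvBRet (l : List Char) (s e : Nat) : Nat :=
  if _h : s < e ∧ pvBad (l.getD (e - 1) ' ') then pvBRet l s (e - 1) else e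
termination_by e
decreasing_by omega


def clean_affiliation_string_alt (affiliation_str : Option String) : String :=
  match affiliation_str with
  | none => ""
  | some s =>
    if s.toList = [] then ""
    else
      let l := s.toList
      let start := pvBAdv l 0 l.length
      let stop := pvBRet l start l.length
      String.ofList (PySem.List.slice l (some (start : Int)) (some (stop : Int)))

-- ===== PRECONDITION & SPEC =====
def Spec_clean_affiliation_string (affiliation_str : Option String) (out : String) : Prop := out = clean_affiliation_string_alt affiliation_str
instance (affiliation_str : Option String) (out : String) : Decidable (Spec_clean_affiliation_string affiliation_str out) := by unfold Spec_clean_affiliation_string; infer_instance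

-- ===== CLAIM (what is proved, stated in full; the proofs are below) =====
def Claim_equal_clean_affiliation_string : Prop := ∀ (affiliation_str : Option String), Dom_clean_affiliation_string affiliation_str → Spec_clean_affiliation_string affiliation_str (clean_affiliation_string affiliation_str)

-- ===== LEMMAS AND PROOFS =====
theorem pv_space_bad {c : Char} (h : PySem.Chars.isspace c = true) : pvBad c = true := by
  simp [pvBad, h]
theorem pv_dropWhile_append_all {p : Char → Bool} {a b : List Char}
    (h : ∀ c ∈ a, p c = true) : List.dropWhile p (a ++ b) = List.dropWhile p b := by
  induction a with
  | nil => rfl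
  | cons x xs ih =>
    have hx : p x = true := h x (by simp)
    simp only [List.cons_append, List.dropWhile_cons, hx, if_pos]
    exact ih (fun c hc => h c (by simp [hc]))
theorem pv_head?_dropWhile {p : Char → Bool} {l : List Char} {c : Char}
    (h : (List.dropWhile p l).head? = some c) : p c = false := by
  induction l with
  | nil => simp at h
  | cons x xs ih =>
    by_cases hx : p x = true
    · exact ih (by simpa [List.dropWhile_cons, hx] using h)
    · simp [hx] at h
      subst h
      exact Bool.eq_false_iff.mpr hx
theorem pv_rstrip_append_spaces {y ts : List Char}
    (h : ∀ c ∈ ts, PySem.Chars.isspace c = true) :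
    PySem.Chars.rstrip (y ++ ts) = PySem.Chars.rstrip y := by
  simp only [PySem.Chars.rstrip, List.reverse_append]
  rw [pv_dropWhile_append_all (by intro c hc; exact h c (by simpa using hc))]
theorem pv_rstrip_dropWhileBad_append_spaces {x ts : List Char}
    (h : ∀ c ∈ ts, PySem.Chars.isspace c = true) :
    PySem.Chars.rstrip (List.dropWhile pvBad (x ++ ts)) = PySem.Chars.rstrip (List.dropWhile pvBad x) := by
  induction x with
  | nil =>
    rw [List.nil_append, List.dropWhile_eq_nil_iff.mpr (by intro c hc; exact pv_space_bad (h c hc))]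
    rfl
  | cons a x' ih =>
    by_cases ha : pvBad a = true
    · simpa [List.dropWhile_cons, ha] using ih
    · rw [List.cons_append, List.dropWhile_cons_of_neg (by simp [ha]),
        List.dropWhile_cons_of_neg (by simp [ha])]
      exact pv_rstrip_append_spaces (y := a :: x') h

-- decomposition u = rstrip u ++ trailing spaces
theorem pv_rstrip_decomp (u : List Char) :
    u = PySem.Chars.rstrip u ++ (List.takeWhile PySem.Chars.isspace u.reverse).reverse := by
  simp only [PySem.Chars.rstrip]
  rw [← List.reverse_append, List.takeWhile_append_dropWhile, List.reverse_reverse]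

theorem pv_mem_takeWhile_rev_spaces (u : List Char) :
    ∀ c ∈ (List.takeWhile PySem.Chars.isspace u.reverse).reverse, PySem.Chars.isspace c = true := by
  intro c hc
  exact List.mem_takeWhile_imp (by simpa using hc)


-- Step 1
theorem pv_aLead_strip (l : List Char) :
    pvALead (PySem.Chars.strip l) = PySem.Chars.rstrip (List.dropWhile pvBad l) := by
  have hstrip : PySem.Chars.strip l
      = PySem.Chars.rstrip (List.dropWhile PySem.Chars.isspace l) := rfl
  have hbadl : List.dropWhile pvBad l = List.dropWhile pvBad (List.dropWhile PySem.Chars.isspace l) := by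
    conv_lhs => rw [← List.takeWhile_append_dropWhile (p := PySem.Chars.isspace) (l := l)]
    exact pv_dropWhile_append_all (fun c hc => pv_space_bad (List.mem_takeWhile_imp hc))
  match hu : List.dropWhile PySem.Chars.isspace l with
  | [] =>
    rw [hstrip, hbadl, hu]
    simp [pvALead, PySem.Chars.rstrip]
  | c :: r =>
    have hc : PySem.Chars.isspace c = false :=
      pv_head?_dropWhile (p := PySem.Chars.isspace) (l := l) (by rw [hu]; rfl)
    set ts := (List.takeWhile PySem.Chars.isspace (c :: r).reverse).reverse with hts
    have hdec : c :: r = PySem.Chars.rstrip (c :: r) ++ ts := pv_rstrip_decomp (c :: r)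
    have hts_sp : ∀ x ∈ ts, PySem.Chars.isspace x = true := pv_mem_takeWhile_rev_spaces (c :: r)
    have hvne : PySem.Chars.rstrip (c :: r) ≠ [] := by
      intro hv
      rw [hv, List.nil_append] at hdec
      have : PySem.Chars.isspace c = true := hts_sp c (by rw [← hdec]; simp)
      simp [this] at hc
    obtain ⟨r', hv⟩ : ∃ r', PySem.Chars.rstrip (c :: r) = c :: r' := by
      match hw : PySem.Chars.rstrip (c :: r) with
      | [] => exact absurd hw hvne
      | d :: r' =>
        rw [hw] at hdec
        have : c = d := by simpa using congrArg (·.head?) hdec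
        exact ⟨r', by rw [this]⟩
    have hr : r = r' ++ ts := by
      rw [hv] at hdec
      simpa using hdec
    by_cases hpc : c ∈ pvPunct
    · -- loop body runs
      have hlen : r'.length < l.length := by
        have h1 : (c :: r).length ≤ l.length := by
          rw [← hu]; exact List.length_dropWhile_le _ _
        have h2 : r.length = r'.length + ts.length := by rw [hr]; simp
        simp at h1; omega
      rw [hstrip, hbadl, hu, hv]
      rw [show pvALead (c :: r') = pvALead (PySem.Chars.strip r') by
        simp [pvALead, hpc]]
      rw [pv_aLead_strip r']
      rw [List.dropWhile_cons_of_pos (by simp [pvBad, pvPunct] at hpc ⊢; tauto), hr]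
      exact (pv_rstrip_dropWhileBad_append_spaces hts_sp).symm
    · -- loop never runs
      rw [hstrip, hbadl, hu, hv]
      rw [show pvALead (c :: r') = c :: r' by simp [pvALead, hpc]]
      rw [List.dropWhile_cons_of_neg (by simp [pvBad, pvPunct, hc]; simp [pvPunct] at hpc; tauto)]
      exact hv.symm
termination_by l.length
decreasing_by exact hlen

theorem pvATrail_nil : pvATrail [] = [] := by
  rw [pvATrail]
  split
  · rfl
  · next d heq => simp at heq

theorem pvATrail_of_getLast? {l : List Char} {c : Char} (h : l.getLast? = some c) :
    pvATrail l = if pvPunct.contains c then pvATrail (PySem.Chars.strip l.dropLast) else l := by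
  rw [pvATrail]
  split
  · next heq => rw [h] at heq; exact absurd heq (by simp)
  · next d heq => rw [h] at heq; cases heq; rfl

-- Step 2
theorem pv_aTrail_rstrip (m : List Char)
    (hm : ∀ c, m.head? = some c → pvBad c = false) :
    pvATrail (PySem.Chars.rstrip m) = (List.dropWhile pvBad m.reverse).reverse := by
  match m with
  | [] =>
    have : PySem.Chars.rstrip ([] : List Char) = [] := rfl
    rw [this, pvATrail_nil]
    rfl
  | a :: t =>
    have ha : pvBad a = false := hm a rfl
    have has : PySem.Chars.isspace a = false := by
      rcases Bool.eq_false_iff.mp ha with h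
      by_contra hs
      simp at hs
      exact h (pv_space_bad hs)
    set ts := (List.takeWhile PySem.Chars.isspace (a :: t).reverse).reverse with hts
    have hdec : a :: t = PySem.Chars.rstrip (a :: t) ++ ts := pv_rstrip_decomp (a :: t)
    have hts_sp : ∀ x ∈ ts, PySem.Chars.isspace x = true := pv_mem_takeWhile_rev_spaces (a :: t)
    have hts_bad : ∀ x ∈ ts, pvBad x = true := fun x hx => pv_space_bad (hts_sp x hx)
    have hvne : PySem.Chars.rstrip (a :: t) ≠ [] := by
      intro hv
      rw [hv, List.nil_append] at hdec
      have : PySem.Chars.isspace a = true := hts_sp a (by rw [← hdec]; simp)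
      simp [this] at has
    -- k := rstrip (a :: t); its head is a
    have hhead : (PySem.Chars.rstrip (a :: t)).head? = some a := by
      have := congrArg (·.head?) hdec
      simpa [List.head?_append, hvne] using this.symm
    -- reverse of m splits off the trailing spaces
    have hrev : (a :: t).reverse = ts.reverse ++ (PySem.Chars.rstrip (a :: t)).reverse := by
      conv_lhs => rw [hdec]
      simp
    have hdw : List.dropWhile pvBad (a :: t).reverse
        = List.dropWhile pvBad (PySem.Chars.rstrip (a :: t)).reverse := by
      rw [hrev]
      exact pv_dropWhile_append_all (fun x hx => hts_bad x (by simpa using hx))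
    obtain ⟨d, hd⟩ : ∃ d, (PySem.Chars.rstrip (a :: t)).getLast? = some d := by
      cases hk : (PySem.Chars.rstrip (a :: t)).getLast? with
      | none => exact absurd (List.getLast?_eq_none_iff.mp hk) hvne
      | some d => exact ⟨d, rfl⟩
    -- last char of rstrip is not a space
    have hds : PySem.Chars.isspace d = false := by
      have h2 : (PySem.Chars.rstrip (a :: t)).reverse
          = List.dropWhile PySem.Chars.isspace (a :: t).reverse := by
        simp [PySem.Chars.rstrip]
      apply pv_head?_dropWhile (p := PySem.Chars.isspace) (l := (a :: t).reverse)
      rw [← h2, List.head?_reverse]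
      exact hd
    have hkrev : (PySem.Chars.rstrip (a :: t)).reverse
        = d :: (PySem.Chars.rstrip (a :: t)).dropLast.reverse := by
      conv_lhs => rw [← List.dropLast_append_getLast? d hd]
      simp
    by_cases hpd : d ∈ pvPunct
    · -- trailing loop runs
      have hbd : pvBad d = true := by simp [pvBad, hpd]
      -- k.dropLast is nonempty with head a, or the precondition is contradicted
      have hkd : (PySem.Chars.rstrip (a :: t)).dropLast ≠ [] := by
        intro hnil
        have hk1 : PySem.Chars.rstrip (a :: t) = [d] := by
          have := List.dropLast_append_getLast? d hd
          rw [hnil] at this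
          simpa using this.symm
        rw [hk1] at hhead
        simp at hhead
        rw [hhead] at hbd
        simp [ha] at hbd
      have hhead' : ∀ c, (PySem.Chars.rstrip (a :: t)).dropLast.head? = some c → pvBad c = false := by
        intro c hc
        have := List.head?_append_of_ne_nil (l₂ := [d]) ((PySem.Chars.rstrip (a :: t)).dropLast) hkd
        rw [hc] at this
        rw [List.dropLast_append_getLast? d hd] at this
        rw [hhead] at this
        cases this
        exact ha
      have hlstrip : PySem.Chars.strip (PySem.Chars.rstrip (a :: t)).dropLast
          = PySem.Chars.rstrip (PySem.Chars.rstrip (a :: t)).dropLast := by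
        have hhd : PySem.Chars.lstrip (PySem.Chars.rstrip (a :: t)).dropLast
            = (PySem.Chars.rstrip (a :: t)).dropLast := by
          cases hX : (PySem.Chars.rstrip (a :: t)).dropLast with
          | nil => rfl
          | cons x xs =>
            have hx : pvBad x = false := hhead' x (by rw [hX]; rfl)
            have hxs : PySem.Chars.isspace x = false := by
              rcases Bool.eq_false_iff.mp hx with hq
              by_contra hs
              simp at hs
              exact hq (pv_space_bad hs)
            simp [PySem.Chars.lstrip, hxs]
        show PySem.Chars.rstrip (PySem.Chars.lstrip _) = _
        rw [hhd]
      have hlen : (PySem.Chars.rstrip (a :: t)).dropLast.length < (a :: t).length := by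
        have h1 : (PySem.Chars.rstrip (a :: t)).length ≤ (a :: t).length := by
          conv_rhs => rw [hdec]
          simp
        have h2 : 0 < (PySem.Chars.rstrip (a :: t)).length := List.length_pos_iff.mpr hvne
        have h3 : (a :: t).length = t.length + 1 := by simp
        rw [h3] at h1
        simp [List.length_dropLast]
        omega
      rw [pvATrail_of_getLast? hd, if_pos (by simpa using hpd), hlstrip,
        pv_aTrail_rstrip (PySem.Chars.rstrip (a :: t)).dropLast hhead', hdw, hkrev,
        List.dropWhile_cons_of_pos hbd]
    · -- trailing loop does not run
      have hbd : pvBad d = false := by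
        simp [pvBad, hds, hpd]
      rw [pvATrail_of_getLast? hd, if_neg (by simpa using hpd), hdw, hkrev,
        List.dropWhile_cons_of_neg (by simp [hbd]), ← hkrev]
      simp
termination_by m.length
decreasing_by exact hlen

theorem pv_bAdv_spec (l : List Char) (s : Nat) :
    pvBAdv l s l.length = s + (List.takeWhile pvBad (l.drop s)).length := by
  rw [pvBAdv]
  by_cases hs : s < l.length
  · have hget : l.getD s ' ' = l[s] := List.getD_eq_getElem l ' ' hs
    have hd : l.drop s = l[s] :: l.drop (s + 1) := List.drop_eq_getElem_cons hs
    by_cases hb : pvBad l[s] = true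
    · rw [dif_pos ⟨hs, by rw [hget]; exact hb⟩, pv_bAdv_spec l (s + 1), hd,
        List.takeWhile_cons_of_pos hb]
      simp; omega
    · rw [dif_neg (by rintro ⟨_, h2⟩; rw [hget] at h2; exact hb h2), hd,
        List.takeWhile_cons_of_neg hb]
      simp
  · rw [dif_neg (by rintro ⟨h1, _⟩; exact hs h1), List.drop_eq_nil_of_le (by omega)]
    simp
termination_by l.length - s
decreasing_by omega

theorem pv_bRet_spec (l : List Char) (s e : Nat) (he : e ≤ l.length) :
    pvBRet l s e = e - (List.takeWhile pvBad ((l.take e).drop s).reverse).length := by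
  rw [pvBRet]
  by_cases hs : s < e
  · have he1 : e - 1 < l.length := by omega
    have hget : l.getD (e - 1) ' ' = l[e - 1] := List.getD_eq_getElem l ' ' he1
    have hdec : (l.take e).drop s = (l.take (e - 1)).drop s ++ [l[e - 1]] := by
      have h1 : l.take e = l.take (e - 1) ++ [l[e - 1]] := by
        conv_lhs => rw [show e = (e - 1) + 1 by omega]
        rw [List.take_succ]
        simp [List.getElem?_eq_getElem he1]
      rw [h1, List.drop_append_of_le_length (by simp; omega)]
    have hrev : ((l.take e).drop s).reverse = l[e - 1] :: ((l.take (e - 1)).drop s).reverse := by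
      rw [hdec]; simp
    by_cases hb : pvBad l[e - 1] = true
    · rw [dif_pos ⟨hs, by rw [hget]; exact hb⟩, pv_bRet_spec l s (e - 1) (by omega), hrev,
        List.takeWhile_cons_of_pos hb]
      simp
      have : (List.takeWhile pvBad ((l.take (e - 1)).drop s).reverse).length
          ≤ ((l.take (e - 1)).drop s).reverse.length := (List.takeWhile_sublist _).length_le
      simp at this
      omega
    · rw [dif_neg (by rintro ⟨_, h2⟩; rw [hget] at h2; exact hb h2), hrev,
        List.takeWhile_cons_of_neg hb]
      simp
  · rw [dif_neg (by rintro ⟨h1, _⟩; exact hs h1),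
      List.drop_eq_nil_of_le (le_trans (List.length_take_le e l) (by omega))]
    simp

theorem pv_dropWhile_eq_drop (p : Char → Bool) (l : List Char) :
    List.dropWhile p l = l.drop (List.takeWhile p l).length := by
  induction l with
  | nil => rfl
  | cons x xs ih =>
    by_cases hx : p x = true
    · simp [List.takeWhile_cons, hx, ih]
    · simp [List.takeWhile_cons, hx]

-- main glue
theorem pv_main (l : List Char) :
    pvATrail (pvALead (PySem.Chars.strip l))
      = PySem.List.slice l (some ((pvBAdv l 0 l.length : Nat) : Int))
          (some ((pvBRet l (pvBAdv l 0 l.length) l.length : Nat) : Int)) := by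
  have ha : pvBAdv l 0 l.length = (List.takeWhile pvBad l).length := by
    rw [pv_bAdv_spec]; simp
  have hale : (List.takeWhile pvBad l).length ≤ l.length :=
    (List.takeWhile_sublist _).length_le
  have hu : l.drop (List.takeWhile pvBad l).length = List.dropWhile pvBad l :=
    (pv_dropWhile_eq_drop pvBad l).symm
  set u := List.dropWhile pvBad l with hudef
  have hstop : pvBRet l (pvBAdv l 0 l.length) l.length
      = l.length - (List.takeWhile pvBad u.reverse).length := by
    rw [pv_bRet_spec l _ l.length le_rfl, ha, List.take_length, hu]
  have hk : (List.takeWhile pvBad u.reverse).length ≤ u.length := by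
    have := (List.takeWhile_sublist (p := pvBad) (l := u.reverse)).length_le
    simpa using this
  have hulen : u.length = l.length - (List.takeWhile pvBad l).length := by
    rw [hudef, pv_dropWhile_eq_drop]; simp
  rw [pv_aLead_strip l, pv_aTrail_rstrip u (fun c hc => pv_head?_dropWhile hc)]
  rw [hstop, ha, PySem.List.slice_natCast, hu]
  have harith : l.length - (List.takeWhile pvBad u.reverse).length - (List.takeWhile pvBad l).length
      = u.length - (List.takeWhile pvBad u.reverse).length := by omega
  rw [harith, pv_dropWhile_eq_drop, List.reverse_drop]
  simp

-- ===== VERDICT (by name: the statement is the Claim_ definition above) =====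
theorem clean_affiliation_string_spec : Claim_equal_clean_affiliation_string := by
  intro o _
  unfold Spec_clean_affiliation_string
  cases o with
  | none => rfl
  | some s =>
    show clean_affiliation_string (some s) = clean_affiliation_string_alt (some s)
    unfold clean_affiliation_string clean_affiliation_string_alt
    by_cases hnil : s.toList = []
    · simp [hnil]
    · simp only [hnil, reduceIte]
      exact congrArg String.ofList (pv_main s.toList)
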